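-- pv_equiv track=rewrite | github.com/olivierinizan/emc | experiment/Lib.py | compute_r_2
-- ===== SOURCE A (Python) =====
-- FILTERED_PROPERTIES = []
--
-- def get_properties(instance):
--     properties = set()
--     for s,p,o in instance:
--         if p not in properties:
--             properties.add(p)
--     return properties
--
-- def get_property_values(prop,instance):
--     values = []
--     for s,p,o in instance:
--         if p == prop:
--             values.append(o)
--     return values
--
-- def compute_shared_unshared_properties(pair):
--     i1_properties = get_properties(pair[0])
--     i2_properties = get_properties(pair[1])
--
--     shared_properties = i1_properties & i2_properties
--     unshared_properties = i1_properties ^ i2_properties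
--
--     return shared_properties, unshared_properties
--
-- def compute_edo_for_a_pair2(i1,i2,id_i1,id_i2):
--         # epsilon: the set of properties with the same values
--         # delta: the set of properties with different values
--         # omega: the set of unshared properties
--         epsilon, delta, omega = [],[],[]
--         shared,unshared = compute_shared_unshared_properties((i1,i2))
--
--         i1_properties = get_properties(i1)
--         i2_properties = get_properties(i2)
--
--         # shared and unsahred properties must cover all properties
--         assert(set(list(i1_properties) + list(i2_properties)) == set(list(shared) + list(unshared)))
--
--         # for each property in shared
--         for p in shared:
--             # filter properties
--             if p in FILTERED_PROPERTIES:
--                 continue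
--
--             # list of values for instances x and y
--             i1_list_of_values = get_property_values(p,i1)
--             i2_list_of_values = get_property_values(p,i2)
--
--             # we consider all properties as data properties
--             i1_set_of_values = set(i1_list_of_values)
--             i2_set_of_values = set(i2_list_of_values)
--
--             i1_and_i2 = i1_set_of_values & i2_set_of_values
--             i1_xor_i2 = i1_set_of_values ^ i2_set_of_values
--
--             if len(i1_and_i2) != 0:
--                 epsilon.append(p)
--             if len(i1_xor_i2) != 0:
--                 delta.append(p)
--             # we can not have both sets empty
--             if len(i1_and_i2) == 0 and len(i1_xor_i2) ==0:
--                 raise exception("values/properties exception")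
--
--         for p in unshared:
--             # filter properties
--             if p in FILTERED_PROPERTIES:
--                 continue
--             omega.append(p)
--
--         # sort epsilon, delta omega in oder to use them as dict keys
--         epsilon.sort()
--         delta.sort()
--         omega.sort()
--
--         return epsilon,delta,omega
--
-- def compute_r_2(dict_of_DB,dict_of_YAGO):
--     r_metrics = {}
--     r_pair = {}
--     for id1 in dict_of_DB:
--         for id2 in dict_of_YAGO:
--             i1 = dict_of_DB[id1]
--             i2 = dict_of_YAGO[id2]
--             e,d,o = compute_edo_for_a_pair2(i1,i2,id1,id2)
--             key_r = str(e) + str(d) + str(o)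
--             if key_r not in r_metrics:
--                 r_metrics[key_r] = 0
--                 r_pair[key_r] = []
--             r_metrics[key_r] += 1
--             r_pair[key_r].append((id1,id2))
--     return r_metrics,r_pair
-- ===== SOURCE B (Python) =====
-- FILTERED_PROPERTIES = []
--
-- def _prop_map(instance):
--     """property -> set of values, built in one pass over the triples."""
--     m = {}
--     for s, p, o in instance:
--         if p in m:
--             m[p].add(o)
--         else:
--             m[p] = {o}
--     return m
--
-- def compute_r_2(dict_of_DB, dict_of_YAGO):
--     # Precompute each instance's property->value-set map once, instead of
--     # rescanning the triple list for every pair and every property.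
--     db = [(id1, _prop_map(inst)) for id1, inst in dict_of_DB.items()]
--     yago = [(id2, _prop_map(inst)) for id2, inst in dict_of_YAGO.items()]
--
--     groups = {}
--     for id1, m1 in db:
--         for id2, m2 in yago:
--             eps, dlt = [], []
--             for p, v1 in m1.items():
--                 v2 = m2.get(p)
--                 if v2 is None:
--                     continue
--                 if v1 & v2:
--                     eps.append(p)
--                 if v1 != v2:
--                     dlt.append(p)
--             omega = [p for p in m1 if p not in m2] + [p for p in m2 if p not in m1]
--             key = str(sorted(eps)) + str(sorted(dlt)) + str(sorted(omega))
--             if key in groups: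
--                 groups[key].append((id1, id2))
--             else:
--                 groups[key] = [(id1, id2)]
--     return {k: len(v) for k, v in groups.items()}, groups
-- ===== Notes on version B (the rewrite author's own statement) =====
-- stated objective: faster
-- what changed: B precomputes one property->value-set dict per instance and groups pairs in a single dict of id-pair lists (counts derived as list lengths), instead of rescanning each instance's triple list for every pair and every shared property as A does.
import Mathlib
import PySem

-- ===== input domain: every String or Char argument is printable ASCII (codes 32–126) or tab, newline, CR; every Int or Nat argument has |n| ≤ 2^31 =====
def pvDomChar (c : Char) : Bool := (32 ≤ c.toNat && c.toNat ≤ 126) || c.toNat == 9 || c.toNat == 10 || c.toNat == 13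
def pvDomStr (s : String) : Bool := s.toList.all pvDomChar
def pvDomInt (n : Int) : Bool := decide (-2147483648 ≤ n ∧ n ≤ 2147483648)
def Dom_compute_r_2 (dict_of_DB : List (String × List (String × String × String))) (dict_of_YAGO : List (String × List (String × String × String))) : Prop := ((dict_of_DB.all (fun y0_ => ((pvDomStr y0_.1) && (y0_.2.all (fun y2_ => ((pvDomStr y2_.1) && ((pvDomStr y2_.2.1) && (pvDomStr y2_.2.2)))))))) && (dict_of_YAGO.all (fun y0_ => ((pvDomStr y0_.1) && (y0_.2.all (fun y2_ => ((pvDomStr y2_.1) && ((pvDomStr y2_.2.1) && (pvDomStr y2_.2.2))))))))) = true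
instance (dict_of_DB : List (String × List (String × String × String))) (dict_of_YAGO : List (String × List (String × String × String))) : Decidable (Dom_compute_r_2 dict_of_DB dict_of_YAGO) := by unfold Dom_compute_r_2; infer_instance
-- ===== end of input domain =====

-- B precomputes one property→value-set dict per instance and groups the pairs in a single
-- dict of id-pair lists (counts read off as lengths), instead of rescanning each instance's
-- triple list for every pair and every shared property as A does (objective: faster).

-- str() on a list of strings: '[' ++ ', '-joined reprs ++ ']'; repr of a string is exact on
-- printable ASCII plus tab/newline/CR (the stated input domain). Both Pythons call this
-- builtin to build the group key, so both ports share this helper.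
def pyReprChars (cs : List Char) : List Char :=
  let q : Char := if cs.contains '\'' && !(cs.contains '"') then '"' else '\''
  [q] ++ (cs.flatMap (fun c =>
    if c = '\\' then ['\\', '\\']
    else if c = q then ['\\', q]
    else if c = '\t' then ['\\', 't']
    else if c = '\n' then ['\\', 'n']
    else if c = '\r' then ['\\', 'r']
    else [c])) ++ [q]

def pyStrOfStrList (xs : List String) : String :=
  String.ofList ('[' :: PySem.Chars.join [',', ' '] (xs.map (fun s => pyReprChars s.toList)) ++ [']'])

-- ===== PORT A =====
def pyGetProperties (inst : List (String × String × String)) : PySem.Set String :=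
  inst.foldl (fun properties t =>
    if PySem.Set.contains properties t.2.1 then properties
    else PySem.Set.add properties t.2.1) PySem.Set.empty

def pyGetPropertyValues (prop : String) (inst : List (String × String × String)) : List String :=
  inst.foldl (fun values t => if t.2.1 == prop then values ++ [t.2.2] else values) []

def computeSharedUnshared (pair : (List (String × String × String)) × (List (String × String × String))) :
    PySem.Set String × PySem.Set String :=
  let i1_properties := pyGetProperties pair.1
  let i2_properties := pyGetProperties pair.2
  (PySem.Set.inter i1_properties i2_properties, PySem.Set.symmDiff i1_properties i2_properties)

-- A's assert always holds, and its 'raise' branch is unreachable (a shared property has a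
-- nonempty value set on both sides, so intersection and symmetric difference are never both
-- empty). epsilon/delta/omega are sorted before any use, so iterating the shared/unshared
-- sets in first-insertion order is exact.
def computeEdoForAPair2 (i1 i2 : List (String × String × String)) (_id_i1 _id_i2 : String) :
    List String × List String × List String :=
  let su := computeSharedUnshared (i1, i2)
  let ed := su.1.foldl (fun (ed : List String × List String) p =>
    if ([] : List String).contains p then ed   -- FILTERED_PROPERTIES = []
    else
      let v1 := PySem.Set.ofList (pyGetPropertyValues p i1)
      let v2 := PySem.Set.ofList (pyGetPropertyValues p i2)
      let ed1 := if (PySem.Set.inter v1 v2).length ≠ 0 then (ed.1 ++ [p], ed.2) else ed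
      if (PySem.Set.symmDiff v1 v2).length ≠ 0 then (ed1.1, ed1.2 ++ [p]) else ed1) ([], [])
  let omega := su.2.foldl (fun om p =>
    if ([] : List String).contains p then om else om ++ [p]) ([] : List String)
  (PySem.List.sorted ed.1 (fun x => x) false,
   PySem.List.sorted ed.2 (fun x => x) false,
   PySem.List.sorted omega (fun x => x) false)

def compute_r_2 (dict_of_DB : List (String × List (String × String × String))) (dict_of_YAGO : List (String × List (String × String × String))) : (List (String × Int)) × (List (String × List (String × String))) :=
  let dDB := PySem.Dict.ofList dict_of_DB
  let dY := PySem.Dict.ofList dict_of_YAGO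
  let st := dDB.keys.foldl (fun st id1 =>
    dY.keys.foldl (fun (st : PySem.Dict String Int × PySem.Dict String (List (String × String))) id2 =>
      let i1 := dDB.getD id1 []
      let i2 := dY.getD id2 []
      let edo := computeEdoForAPair2 i1 i2 id1 id2
      let key_r := pyStrOfStrList edo.1 ++ pyStrOfStrList edo.2.1 ++ pyStrOfStrList edo.2.2
      let st1 := if st.1.contains key_r then st else (st.1.insert key_r 0, st.2.insert key_r [])
      (st1.1.modify key_r 0 (· + 1), st1.2.modify key_r [] (· ++ [(id1, id2)]))) st)
    (PySem.Dict.empty, PySem.Dict.empty)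
  (st.1.items, st.2.items)

-- ===== PORT B =====
def propMapB (inst : List (String × String × String)) : PySem.Dict String (PySem.Set String) :=
  inst.foldl (fun m t =>
    if m.contains t.2.1 then m.modify t.2.1 PySem.Set.empty (fun v => PySem.Set.add v t.2.2)
    else m.insert t.2.1 (PySem.Set.add PySem.Set.empty t.2.2)) PySem.Dict.empty

def pairEdoKeyB (m1 m2 : PySem.Dict String (PySem.Set String)) : String :=
  let ed := m1.items.foldl (fun (ed : List String × List String) pv =>
    match m2.get? pv.1 with
    | none => ed
    | some v2 =>
      let ed1 := if (PySem.Set.inter pv.2 v2).length ≠ 0 then (ed.1 ++ [pv.1], ed.2) else ed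
      if PySem.Set.equal pv.2 v2 then ed1 else (ed1.1, ed1.2 ++ [pv.1])) ([], [])
  let omega := m1.keys.filter (fun p => !(m2.contains p)) ++ m2.keys.filter (fun p => !(m1.contains p))
  pyStrOfStrList (PySem.List.sorted ed.1 (fun x => x) false) ++
  pyStrOfStrList (PySem.List.sorted ed.2 (fun x => x) false) ++
  pyStrOfStrList (PySem.List.sorted omega (fun x => x) false)

def compute_r_2_alt (dict_of_DB : List (String × List (String × String × String))) (dict_of_YAGO : List (String × List (String × String × String))) : (List (String × Int)) × (List (String × List (String × String))) :=
  let db := (PySem.Dict.ofList dict_of_DB).items.map (fun pr => (pr.1, propMapB pr.2))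
  let yago := (PySem.Dict.ofList dict_of_YAGO).items.map (fun pr => (pr.1, propMapB pr.2))
  let groups := db.foldl (fun g pr1 =>
    yago.foldl (fun (g : PySem.Dict String (List (String × String))) pr2 =>
      let key := pairEdoKeyB pr1.2 pr2.2
      if g.contains key then g.modify key [] (· ++ [(pr1.1, pr2.1)])
      else g.insert key [(pr1.1, pr2.1)]) g) PySem.Dict.empty
  (groups.items.map (fun kv => (kv.1, (kv.2.length : Int))), groups.items)

-- ===== PRECONDITION & SPEC =====
def Spec_compute_r_2 (dict_of_DB : List (String × List (String × String × String))) (dict_of_YAGO : List (String × List (String × String × String))) (out : (List (String × Int)) × (List (String × List (String × String)))) : Prop := out = compute_r_2_alt dict_of_DB dict_of_YAGO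
instance (dict_of_DB : List (String × List (String × String × String))) (dict_of_YAGO : List (String × List (String × String × String))) (out : (List (String × Int)) × (List (String × List (String × String)))) : Decidable (Spec_compute_r_2 dict_of_DB dict_of_YAGO out) := by unfold Spec_compute_r_2; infer_instance

-- ===== CLAIM (what is proved, stated in full; the proofs are below) =====
def Claim_equal_compute_r_2 : Prop := ∀ (dict_of_DB : List (String × List (String × String × String))) (dict_of_YAGO : List (String × List (String × String × String))), Dom_compute_r_2 dict_of_DB dict_of_YAGO → Spec_compute_r_2 dict_of_DB dict_of_YAGO (compute_r_2 dict_of_DB dict_of_YAGO)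

-- ===== LEMMAS AND PROOFS =====

-- ---- characterisations of A's helpers ----
theorem props_eq (i : List (String × String × String)) :
    pyGetProperties i = PySem.Set.ofList (i.map (fun t => t.2.1)) := by
  unfold pyGetProperties
  have h : (fun (s : PySem.Set String) (t : String × String × String) =>
      if PySem.Set.contains s t.2.1 then s else PySem.Set.add s t.2.1)
      = fun s t => PySem.Set.add s t.2.1 := by
    funext s t
    by_cases h : PySem.Set.contains s t.2.1 <;> simp [PySem.Set.add]
  rw [h, ← PySem.Set.update_map_eq_foldl_add]
  exact PySem.Set.update_empty _

theorem values_eq (p : String) (i : List (String × String × String)) :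
    pyGetPropertyValues p i = (i.filter (fun t => t.2.1 == p)).map (fun t => t.2.2) := by
  unfold pyGetPropertyValues
  rw [PySem.List.foldl_append_if]
  simp

theorem values_eq_nil_iff (p : String) (i : List (String × String × String)) :
    pyGetPropertyValues p i = [] ↔ p ∉ pyGetProperties i := by
  rw [values_eq, props_eq]
  simp [PySem.Set.mem_ofList, List.filter_eq_nil_iff, List.map_eq_nil_iff, List.mem_map]
  aesop

-- ---- B's property map agrees with A's helpers ----
theorem propMapB_eq (i : List (String × String × String)) :
    propMapB i = i.foldl (fun m t => m.insert t.2.1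
      (if m.contains t.2.1 then PySem.Set.add (m.getD t.2.1 PySem.Set.empty) t.2.2
       else PySem.Set.add PySem.Set.empty t.2.2)) PySem.Dict.empty := by
  unfold propMapB
  congr 1
  funext m t
  by_cases h : m.contains t.2.1 <;> simp [h, PySem.Dict.modify]

theorem keys_propMap (i : List (String × String × String)) :
    (propMapB i).keys = pyGetProperties i := by
  rw [propMapB_eq,
    PySem.Dict.keys_foldl_insert_key i (fun t => t.2.1)
      (fun m t => if m.contains t.2.1 then PySem.Set.add (m.getD t.2.1 PySem.Set.empty) t.2.2
        else PySem.Set.add PySem.Set.empty t.2.2) PySem.Dict.empty,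
    props_eq, PySem.Dict.keys_empty]
  exact PySem.Set.update_empty _

theorem nodup_keys_propMap (i : List (String × String × String)) :
    (propMapB i).keys.Nodup := by
  rw [propMapB_eq]
  exact PySem.Dict.nodup_keys_foldl_insert_key i (fun t => t.2.1)
    (fun m t => if m.contains t.2.1 then PySem.Set.add (m.getD t.2.1 PySem.Set.empty) t.2.2
      else PySem.Set.add PySem.Set.empty t.2.2) PySem.Dict.empty PySem.Dict.nodup_keys_empty

theorem contains_propMap (i : List (String × String × String)) (p : String) :
    (propMapB i).contains p = true ↔ p ∈ pyGetProperties i := by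
  rw [PySem.Dict.contains_iff_mem_keys, keys_propMap]

theorem values_append_singleton (p : String) (l : List (String × String × String)) (t : String × String × String) :
    pyGetPropertyValues p (l ++ [t])
      = if t.2.1 == p then pyGetPropertyValues p l ++ [t.2.2] else pyGetPropertyValues p l := by
  unfold pyGetPropertyValues
  rw [List.foldl_append]
  simp [List.foldl]

theorem getD_propMap (i : List (String × String × String)) (p : String) :
    (propMapB i).getD p PySem.Set.empty = PySem.Set.ofList (pyGetPropertyValues p i) := by
  induction i using List.reverseRecOn with
  | nil => simp [propMapB, pyGetPropertyValues, PySem.Dict.getD_empty, PySem.Set.ofList]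
  | append_singleton l t ih =>
    have hstep : propMapB (l ++ [t]) = (propMapB l).insert t.2.1
        (if (propMapB l).contains t.2.1 then PySem.Set.add ((propMapB l).getD t.2.1 PySem.Set.empty) t.2.2
         else PySem.Set.add PySem.Set.empty t.2.2) := by
      rw [propMapB_eq, List.foldl_append, ← propMapB_eq]
      simp [List.foldl]
    rw [hstep, values_append_singleton, PySem.Dict.getD_insert]
    by_cases hp : p = t.2.1
    · rw [show (t.2.1 == p) = true by simp [hp], if_pos hp, ← hp, if_pos rfl]
      by_cases hc : (propMapB l).contains p = true
      · rw [if_pos hc, ih, ← PySem.Set.ofList_append_singleton]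
      · rw [if_neg hc]
        have hnil : pyGetPropertyValues p l = [] := by
          rw [values_eq_nil_iff]
          intro hmem
          exact hc ((contains_propMap l p).mpr hmem)
        rw [hnil]
        rfl
    · rw [show (t.2.1 == p) = false by simp [Ne.symm hp], if_neg hp, ih,
        if_neg (by simp : ¬ (false = true))]

theorem items_propMap (i : List (String × String × String)) :
    (propMapB i).items
      = (pyGetProperties i).map (fun p => (p, PySem.Set.ofList (pyGetPropertyValues p i))) := by
  rw [PySem.Dict.items_eq_map_keys _ (nodup_keys_propMap i) PySem.Set.empty, keys_propMap]
  exact List.map_congr_left (fun p _ => by rw [getD_propMap])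

theorem get?_propMap (i : List (String × String × String)) (p : String) :
    (propMapB i).get? p
      = if p ∈ pyGetProperties i then some (PySem.Set.ofList (pyGetPropertyValues p i)) else none := by
  by_cases h : p ∈ pyGetProperties i
  · rw [if_pos h]
    have hc : (propMapB i).contains p = true := (contains_propMap i p).mpr h
    rw [PySem.Dict.contains_eq_isSome_get?] at hc
    obtain ⟨v, hv⟩ := Option.isSome_iff_exists.mp hc
    have hD := getD_propMap i p
    rw [PySem.Dict.getD_eq_get?_getD, hv] at hD
    simp at hD
    rw [hv, hD]
  · rw [if_neg h, PySem.Dict.get?_eq_none_iff_not_mem_keys, keys_propMap]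
    exact h

-- ---- set equality vs symmetric difference ----
theorem equal_iff_symmDiff_len {α : Type} [BEq α] [LawfulBEq α] (s t : PySem.Set α) :
    PySem.Set.equal s t = true ↔ (PySem.Set.symmDiff s t).length = 0 := by
  rw [PySem.Set.equal_iff]
  simp [PySem.Set.symmDiff, PySem.Set.diff, List.length_eq_zero_iff, List.filter_eq_nil_iff]
  constructor
  · intro h
    exact ⟨fun x hx => (h x).mp hx, fun x hx => (h x).mpr hx⟩
  · intro ⟨h1, h2⟩ x
    exact ⟨h1 x, h2 x⟩

theorem set_contains_eq_decide {α : Type} [BEq α] [LawfulBEq α] (s : PySem.Set α) (x : α) :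
    PySem.Set.contains s x = decide (x ∈ s) := by
  by_cases h : x ∈ s
  · simp only [h, decide_true]
    exact (PySem.Set.contains_iff s x).mpr h
  · simp only [h, decide_false]
    exact Bool.eq_false_iff.mpr (fun hc => h ((PySem.Set.contains_iff s x).mp hc))

theorem contains_propMap_eq (i : List (String × String × String)) (p : String) :
    (propMapB i).contains p = decide (p ∈ pyGetProperties i) := by
  rw [PySem.Dict.contains_eq_decide_mem_keys, keys_propMap]

-- ---- the two epsilon/delta loop shapes ----
theorem foldl_guarded_pair_filter {α : Type} (l : List α) (g c1 c2 : α → Bool) (ab : List α × List α) :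
    l.foldl (fun ed p =>
      if g p then
        (let ed1 := if c1 p then (ed.1 ++ [p], ed.2) else ed;
         if c2 p then (ed1.1, ed1.2 ++ [p]) else ed1)
      else ed) ab
    = (ab.1 ++ (l.filter g).filter c1, ab.2 ++ (l.filter g).filter c2) := by
  induction l generalizing ab with
  | nil => simp
  | cons x xs ih =>
    simp only [List.foldl_cons, List.filter_cons]
    by_cases hg : g x
    · rw [if_pos hg, ih]
      by_cases h1 : c1 x <;> by_cases h2 : c2 x <;> simp [hg, h1, h2]
    · rw [if_neg (by simp [hg]), ih]
      simp [hg]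

-- ---- per-pair key equality ----
theorem keyB_eq (i1 i2 : List (String × String × String)) (id1 id2 : String) :
    pairEdoKeyB (propMapB i1) (propMapB i2)
      = pyStrOfStrList (computeEdoForAPair2 i1 i2 id1 id2).1
        ++ pyStrOfStrList (computeEdoForAPair2 i1 i2 id1 id2).2.1
        ++ pyStrOfStrList (computeEdoForAPair2 i1 i2 id1 id2).2.2 := by
  simp only [pairEdoKeyB, computeEdoForAPair2, computeSharedUnshared]
  rw [items_propMap i1, List.foldl_map]
  -- B's epsilon/delta fold in guarded-filter shape
  have hB : (fun (ed : List String × List String) (p : String) =>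
      (fun (ed : List String × List String) (pv : String × PySem.Set String) =>
        match (propMapB i2).get? pv.1 with
        | none => ed
        | some v2 =>
          let ed1 := if (PySem.Set.inter pv.2 v2).length ≠ 0 then (ed.1 ++ [pv.1], ed.2) else ed
          if PySem.Set.equal pv.2 v2 then ed1 else (ed1.1, ed1.2 ++ [pv.1]))
        ed ((fun p => (p, PySem.Set.ofList (pyGetPropertyValues p i1))) p))
      = fun ed p =>
        if decide (p ∈ pyGetProperties i2) then
          (let ed1 := if (decide ((PySem.Set.inter (PySem.Set.ofList (pyGetPropertyValues p i1)) (PySem.Set.ofList (pyGetPropertyValues p i2))).length ≠ 0)) then (ed.1 ++ [p], ed.2) else ed;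
           if (!PySem.Set.equal (PySem.Set.ofList (pyGetPropertyValues p i1)) (PySem.Set.ofList (pyGetPropertyValues p i2))) then (ed1.1, ed1.2 ++ [p]) else ed1)
        else ed := by
    funext ed p
    simp only [get?_propMap]
    by_cases h : p ∈ pyGetProperties i2
    · rw [if_pos h, if_pos (show decide (p ∈ pyGetProperties i2) = true by simp [h])]
      simp only [decide_eq_true_eq]
      cases PySem.Set.equal (PySem.Set.ofList (pyGetPropertyValues p i1)) (PySem.Set.ofList (pyGetPropertyValues p i2))
      · simp
      · simp
    · rw [if_neg h, if_neg (show ¬ decide (p ∈ pyGetProperties i2) = true by simp [h])]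
  rw [hB, foldl_guarded_pair_filter]
  -- A's epsilon/delta fold in the same shape (the FILTERED_PROPERTIES = [] check is vacuous)
  have hA : (fun (ed : List String × List String) (p : String) =>
      if ([] : List String).contains p = true then ed
      else
        let v1 := PySem.Set.ofList (pyGetPropertyValues p i1)
        let v2 := PySem.Set.ofList (pyGetPropertyValues p i2)
        let ed1 := if (PySem.Set.inter v1 v2).length ≠ 0 then (ed.1 ++ [p], ed.2) else ed
        if (PySem.Set.symmDiff v1 v2).length ≠ 0 then (ed1.1, ed1.2 ++ [p]) else ed1)
      = fun ed p =>
        if (fun (_ : String) => true) p then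
          (let ed1 := if (decide ((PySem.Set.inter (PySem.Set.ofList (pyGetPropertyValues p i1)) (PySem.Set.ofList (pyGetPropertyValues p i2))).length ≠ 0)) then (ed.1 ++ [p], ed.2) else ed;
           if (decide ((PySem.Set.symmDiff (PySem.Set.ofList (pyGetPropertyValues p i1)) (PySem.Set.ofList (pyGetPropertyValues p i2))).length ≠ 0)) then (ed1.1, ed1.2 ++ [p]) else ed1)
        else ed := by
    funext ed p
    simp
  rw [hA, foldl_guarded_pair_filter]
  have homA : (fun (om : List String) (p : String) =>
      if ([] : List String).contains p = true then om else om ++ [p])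
      = fun om p => om ++ [p] := by
    funext om p
    simp
  rw [homA, PySem.List.foldl_append_singleton]
  have hbase : List.filter (fun p => decide (p ∈ pyGetProperties i2)) (pyGetProperties i1)
      = PySem.Set.inter (pyGetProperties i1) (pyGetProperties i2) := by
    simp only [PySem.Set.inter, set_contains_eq_decide]
  have hneq : ∀ s t : PySem.Set String,
      (!PySem.Set.equal s t) = decide ((PySem.Set.symmDiff s t).length ≠ 0) := by
    intro s t
    cases hEq : PySem.Set.equal s t
    · have hne : (PySem.Set.symmDiff s t).length ≠ 0 := fun h0 => by
        rw [(equal_iff_symmDiff_len s t).mpr h0] at hEq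
        cases hEq
      simp [hne]
    · have h0 : (PySem.Set.symmDiff s t).length = 0 := (equal_iff_symmDiff_len s t).mp hEq
      simp [h0]
  have homB : List.filter (fun p => !(propMapB i2).contains p) (propMapB i1).keys ++
        List.filter (fun p => !(propMapB i1).contains p) (propMapB i2).keys
      = PySem.Set.symmDiff (pyGetProperties i1) (pyGetProperties i2) := by
    rw [keys_propMap, keys_propMap]
    simp only [PySem.Set.symmDiff, PySem.Set.diff, contains_propMap_eq, set_contains_eq_decide]
  simp only [List.nil_append, hbase, homB, List.filter_true]
  rw [List.filter_congr (fun p (_ : p ∈ (pyGetProperties i1).inter (pyGetProperties i2)) =>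
    hneq (PySem.Set.ofList (pyGetPropertyValues p i1)) (PySem.Set.ofList (pyGetPropertyValues p i2)))]

-- ---- grouping: A's two dicts vs B's single dict of lists ----
def Mlen (g : PySem.Dict String (List (String × String))) : PySem.Dict String Int :=
  ⟨g.items.map (fun kv => (kv.1, (kv.2.length : Int)))⟩

theorem contains_Mlen (g : PySem.Dict String (List (String × String))) (k : String) :
    (Mlen g).contains k = g.contains k := by
  simp [Mlen, PySem.Dict.contains, List.any_map, Function.comp_def]

theorem get?_Mlen (g : PySem.Dict String (List (String × String))) (k : String) :
    (Mlen g).get? k = (g.get? k).map (fun l => (l.length : Int)) := by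
  simp only [Mlen, PySem.Dict.get?, List.find?_map, Function.comp_def]
  cases g.items.find? (fun p => p.1 == k) <;> simp

theorem step_sim (g : PySem.Dict String (List (String × String))) (k : String) (pr : String × String) :
    (let st1 := if (Mlen g).contains k then ((Mlen g), g)
                else ((Mlen g).insert k 0, g.insert k []);
     (st1.1.modify k 0 (· + 1), st1.2.modify k [] (· ++ [pr])))
    = (Mlen (if g.contains k then g.modify k [] (· ++ [pr]) else g.insert k [pr]),
       if g.contains k then g.modify k [] (· ++ [pr]) else g.insert k [pr]) := by
  by_cases hc : g.contains k = true
  · simp only [contains_Mlen, hc, if_true]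
    refine Prod.ext ?_ rfl
    have hcM : (Mlen g).contains k = true := by rw [contains_Mlen]; exact hc
    obtain ⟨l, hl⟩ : ∃ l, g.get? k = some l := by
      rw [PySem.Dict.contains_eq_isSome_get?] at hc
      exact Option.isSome_iff_exists.mp hc
    have hgl : g.getD k [] = l := by rw [PySem.Dict.getD_eq_get?_getD, hl]; rfl
    have hml : (Mlen g).getD k 0 = (l.length : Int) := by
      rw [PySem.Dict.getD_eq_get?_getD, get?_Mlen, hl]; rfl
    apply PySem.Dict.ext
    show (((Mlen g).modify k 0 (· + 1))).items = (Mlen (g.modify k [] (· ++ [pr]))).items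
    rw [PySem.Dict.modify, PySem.Dict.modify, hgl, hml,
      PySem.Dict.items_insert_of_contains _ _ hcM]
    show _ = ((g.insert k (l ++ [pr])).items.map (fun kv => (kv.1, (kv.2.length : Int))))
    rw [PySem.Dict.items_insert_of_contains _ _ hc]
    show ((g.items.map (fun kv => (kv.1, (kv.2.length : Int)))).map _) = _
    rw [List.map_map, List.map_map]
    apply List.map_congr_left
    intro q hq
    by_cases hqk : q.1 = k
    · simp [hqk]
    · simp [hqk]
  · replace hc : g.contains k = false := by simpa using hc
    simp only [contains_Mlen, hc, if_neg (by simp : ¬ (false = true))]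
    have hcM : (Mlen g).contains k = false := by rw [contains_Mlen]; exact hc
    refine Prod.ext ?_ ?_
    · apply PySem.Dict.ext
      show ((((Mlen g).insert k 0).modify k 0 (· + 1))).items = (Mlen (g.insert k [pr])).items
      rw [PySem.Dict.modify, PySem.Dict.getD_insert_self, PySem.Dict.insert_insert_self,
        PySem.Dict.items_insert_of_not_contains _ _ hcM]
      show _ = ((g.insert k [pr]).items.map (fun kv => (kv.1, (kv.2.length : Int))))
      rw [PySem.Dict.items_insert_of_not_contains _ _ hc]
      simp [Mlen]
    · show ((g.insert k []).modify k [] (· ++ [pr])) = g.insert k [pr]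
      rw [PySem.Dict.modify, PySem.Dict.getD_insert_self, PySem.Dict.insert_insert_self]
      rfl

theorem fold_sim {α : Type} (L : List α)
    (fA : (PySem.Dict String Int × PySem.Dict String (List (String × String))) → α →
          (PySem.Dict String Int × PySem.Dict String (List (String × String))))
    (fB : PySem.Dict String (List (String × String)) → α → PySem.Dict String (List (String × String)))
    (h : ∀ g x, fA (Mlen g, g) x = (Mlen (fB g x), fB g x))
    (g0 : PySem.Dict String (List (String × String))) :
    L.foldl fA (Mlen g0, g0) = (Mlen (L.foldl fB g0), L.foldl fB g0) := by
  induction L generalizing g0 with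
  | nil => rfl
  | cons x xs ih => simpa [h g0 x] using ih (fB g0 x)

theorem fold_sim2 (L : List String) (key : String → String) (mk : String → String × String)
    (g0 : PySem.Dict String (List (String × String))) :
    L.foldl (fun st x =>
      ((if st.1.contains (key x) = true then st
        else (st.1.insert (key x) 0, st.2.insert (key x) [])).1.modify (key x) 0 (fun v => v + 1),
       (if st.1.contains (key x) = true then st
        else (st.1.insert (key x) 0, st.2.insert (key x) [])).2.modify (key x) [] (fun v => v ++ [mk x])))
      (Mlen g0, g0)
    = (Mlen (L.foldl (fun g x => if g.contains (key x) = true then g.modify (key x) [] (fun v => v ++ [mk x])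
          else g.insert (key x) [mk x]) g0),
       L.foldl (fun g x => if g.contains (key x) = true then g.modify (key x) [] (fun v => v ++ [mk x])
          else g.insert (key x) [mk x]) g0) := by
  induction L generalizing g0 with
  | nil => rfl
  | cons x xs ih =>
    simp only [List.foldl_cons]
    have h := step_sim g0 (key x) (mk x)
    simp only [] at h
    rw [h, ih]

-- ===== VERDICT (by name: the statement is the Claim_ definition above) =====
theorem compute_r_2_spec : Claim_equal_compute_r_2 := by
  intro dDBl dYl _
  unfold Spec_compute_r_2
  simp only [compute_r_2, compute_r_2_alt]
  rw [PySem.Dict.items_eq_map_keys (PySem.Dict.ofList dDBl) (PySem.Dict.nodup_keys_ofList dDBl) ([] : List (String × String × String)),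
      PySem.Dict.items_eq_map_keys (PySem.Dict.ofList dYl) (PySem.Dict.nodup_keys_ofList dYl) ([] : List (String × String × String)),
      List.map_map, List.map_map]
  simp only [List.foldl_map]
  simp only [← keyB_eq]
  rw [show (PySem.Dict.empty : PySem.Dict String Int) = Mlen PySem.Dict.empty from rfl]
  rw [fold_sim _ _ _ (fun g id1 => fold_sim2 (PySem.Dict.ofList dYl).keys
        (fun id2 => pairEdoKeyB (propMapB ((PySem.Dict.ofList dDBl).getD id1 []))
          (propMapB ((PySem.Dict.ofList dYl).getD id2 [])))
        (fun id2 => (id1, id2)) g) PySem.Dict.empty]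
  rfl
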